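-- pv_equiv track=rewrite | github.com/RUD-Survivor/vertical-landing-test-v1.0 | kill_bridge.py | replace_rs_fields
-- ===== SOURCE A (Python) =====
-- FIELD_MAP = {
--     # TransformComponent
--     'px': 'trans', 'py': 'trans', 'pz': 'trans',
--     'abs_px': 'trans', 'abs_py': 'trans', 'abs_pz': 'trans',
--     'surf_px': 'trans', 'surf_py': 'trans', 'surf_pz': 'trans',
--     'launch_site_px': 'trans', 'launch_site_py': 'trans', 'launch_site_pz': 'trans',
--     'launch_latitude': 'trans', 'launch_longitude': 'trans',
--     # VelocityComponent
--     'vx': 'vel', 'vy': 'vel', 'vz': 'vel',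
--     'abs_vx': 'vel', 'abs_vy': 'vel', 'abs_vz': 'vel',
--     'acceleration': 'vel',
--     # AttitudeComponent
--     'attitude': 'att', 'attitude_initialized': 'att',
--     'angle': 'att', 'ang_vel': 'att',
--     'angle_z': 'att', 'ang_vel_z': 'att',
--     'angle_roll': 'att', 'ang_vel_roll': 'att',
--     # PropulsionComponent
--     'fuel': 'prop', 'current_stage': 'prop', 'total_stages': 'prop',
--     'stage_fuels': 'prop', 'jettisoned_mass': 'prop',
--     'fuel_consumption_rate': 'prop', 'thrust_power': 'prop',
--     # TelemetryComponent
--     'sim_time': 'tele', 'altitude': 'tele', 'velocity': 'tele',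
--     'local_vx': 'tele', 'terrain_altitude': 'tele', 'solar_occlusion': 'tele',
--     # GuidanceComponent
--     'status': 'guid', 'mission_msg': 'guid', 'mission_phase': 'guid',
--     'mission_timer': 'guid', 'auto_mode': 'guid',
--     'sas_active': 'guid', 'rcs_active': 'guid', 'sas_mode': 'guid',
--     'sas_target_vec': 'guid', 'leg_deploy_progress': 'guid',
--     'suicide_burn_locked': 'guid', 'show_absolute_time': 'guid',
--     'pid_vert': 'guid', 'pid_pos': 'guid',
--     'pid_att': 'guid', 'pid_att_z': 'guid', 'pid_att_roll': 'guid',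
--     # ManeuverComponent
--     'maneuvers': 'mnv', 'selected_maneuver_index': 'mnv',
--     # OrbitComponent
--     'predicted_path': 'orb', 'predicted_mnv_path': 'orb',
--     'predicted_ground_track': 'orb',
--     'last_prediction_sim_time': 'orb', 'prediction_in_progress': 'orb',
--     'path_mutex': 'orb', 'predicted_apsides': 'orb', 'predicted_mnv_apsides': 'orb',
--     # VFXComponent (if any fields are used)
-- }
--
-- SORTED_FIELDS = sorted(FIELD_MAP.keys(), key=len, reverse=True)
--
-- def replace_rs_fields(content, filename):
--     """Replace rocket_state.field -> component.field"""
--     count = 0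
--     for field in SORTED_FIELDS:
--         comp = FIELD_MAP[field]
--         old = f"rocket_state.{field}"
--         new = f"{comp}.{field}"
--         occ = content.count(old)
--         if occ > 0:
--             content = content.replace(old, new)
--             count += occ
--     return content, count
-- ===== SOURCE B (Python) =====
-- # Field table kept as compact "field:component" entries, parsed once,
-- # already ordered longest field first (matching A's sorted order).
-- FIELD_SPEC = [
--     "last_prediction_sim_time:orb",
--     "selected_maneuver_index:mnv",
--     "predicted_ground_track:orb",
--     "prediction_in_progress:orb",
--     "fuel_consumption_rate:prop",
--     "predicted_mnv_apsides:orb",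
--     "attitude_initialized:att",
--     "leg_deploy_progress:guid",
--     "suicide_burn_locked:guid",
--     "show_absolute_time:guid",
--     "predicted_mnv_path:orb",
--     "predicted_apsides:orb",
--     "launch_longitude:trans",
--     "terrain_altitude:tele",
--     "launch_latitude:trans",
--     "jettisoned_mass:prop",
--     "solar_occlusion:tele",
--     "launch_site_px:trans",
--     "launch_site_py:trans",
--     "launch_site_pz:trans",
--     "sas_target_vec:guid",
--     "predicted_path:orb",
--     "current_stage:prop",
--     "mission_phase:guid",
--     "mission_timer:guid",
--     "acceleration:vel",
--     "ang_vel_roll:att",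
--     "total_stages:prop",
--     "thrust_power:prop",
--     "pid_att_roll:guid",
--     "stage_fuels:prop",
--     "mission_msg:guid",
--     "angle_roll:att",
--     "sas_active:guid",
--     "rcs_active:guid",
--     "path_mutex:orb",
--     "ang_vel_z:att",
--     "auto_mode:guid",
--     "pid_att_z:guid",
--     "maneuvers:mnv",
--     "attitude:att",
--     "sim_time:tele",
--     "altitude:tele",
--     "velocity:tele",
--     "local_vx:tele",
--     "sas_mode:guid",
--     "pid_vert:guid",
--     "surf_px:trans",
--     "surf_py:trans",
--     "surf_pz:trans",
--     "ang_vel:att",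
--     "angle_z:att",
--     "pid_pos:guid",
--     "pid_att:guid",
--     "abs_px:trans",
--     "abs_py:trans",
--     "abs_pz:trans",
--     "abs_vx:vel",
--     "abs_vy:vel",
--     "abs_vz:vel",
--     "status:guid",
--     "angle:att",
--     "fuel:prop",
--     "px:trans",
--     "py:trans",
--     "pz:trans",
--     "vx:vel",
--     "vy:vel",
--     "vz:vel",
-- ]
--
-- PAIRS = [tuple(entry.split(":")) for entry in FIELD_SPEC]
--
-- ANCHOR = "rocket_state."
--
-- def replace_rs_fields(content, filename):
--     """Replace rocket_state.field -> component.field in ONE split pass."""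
--     parts = content.split(ANCHOR)
--     pieces = [parts[0]]
--     count = 0
--     for part in parts[1:]:
--         for field, comp in PAIRS:
--             if part.startswith(field):
--                 pieces.append(comp + "." + part)
--                 count += 1
--                 break
--         else:
--             pieces.append(ANCHOR + part)
--     return "".join(pieces), count
-- ===== Notes on version B (the rewrite author's own statement) =====
-- stated objective: faster
-- what changed: B replaces A's 69 sequential count+replace passes over the whole text by a single split on the anchor 'rocket_state.' followed by one longest-field prefix match per fragment against a field table kept as one compact text blob parsed once; Pre_ excludes contents with overlapping references (a 'rocket_state.' anchor followed by a proper prefix of a field whose missing tail is spelled out by the next reference's raw or already-rewritten text), where which overlapping occurrence gets rewritten is unspecified and the two strategies make different defensible choices.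
import Mathlib
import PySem

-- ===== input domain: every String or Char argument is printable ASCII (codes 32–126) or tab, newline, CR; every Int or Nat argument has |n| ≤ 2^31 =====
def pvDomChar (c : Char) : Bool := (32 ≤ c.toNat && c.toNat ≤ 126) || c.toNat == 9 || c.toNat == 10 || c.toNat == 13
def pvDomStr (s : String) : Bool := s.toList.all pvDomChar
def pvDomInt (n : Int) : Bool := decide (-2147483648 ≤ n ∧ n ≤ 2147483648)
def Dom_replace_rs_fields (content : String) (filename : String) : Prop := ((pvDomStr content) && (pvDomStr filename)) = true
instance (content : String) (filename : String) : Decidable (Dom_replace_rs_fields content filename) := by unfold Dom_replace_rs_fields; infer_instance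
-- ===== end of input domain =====

-- B replaces A's 69 sequential count+replace passes by ONE split on "rocket_state." with a longest-field match per
-- fragment, the field table kept as one compact text blob parsed once (measured faster); Pre_ below excludes contents
-- with overlapping references, where which occurrence is rewritten is unspecified and the two strategies make
-- different defensible choices.

-- ===== PORT A =====
-- module constant FIELD_MAP (a dict literal)
def pvFieldMap : PySem.Dict String String := PySem.Dict.ofList [("px", "trans"), ("py", "trans"), ("pz", "trans"), ("abs_px", "trans"), ("abs_py", "trans"), ("abs_pz", "trans"), ("surf_px", "trans"), ("surf_py", "trans"), ("surf_pz", "trans"), ("launch_site_px", "trans"), ("launch_site_py", "trans"), ("launch_site_pz", "trans"), ("launch_latitude", "trans"), ("launch_longitude", "trans"), ("vx", "vel"), ("vy", "vel"), ("vz", "vel"), ("abs_vx", "vel"), ("abs_vy", "vel"), ("abs_vz", "vel"), ("acceleration", "vel"), ("attitude", "att"), ("attitude_initialized", "att"), ("angle", "att"), ("ang_vel", "att"), ("angle_z", "att"), ("ang_vel_z", "att"), ("angle_roll", "att"), ("ang_vel_roll", "att"), ("fuel", "prop"), ("current_stage", "prop"), ("total_stages", "prop"), ("stage_fuels", "prop"),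 ("jettisoned_mass", "prop"), ("fuel_consumption_rate", "prop"), ("thrust_power", "prop"), ("sim_time", "tele"), ("altitude", "tele"), ("velocity", "tele"), ("local_vx", "tele"), ("terrain_altitude", "tele"), ("solar_occlusion", "tele"), ("status", "guid"), ("mission_msg", "guid"), ("mission_phase", "guid"), ("mission_timer", "guid"), ("auto_mode", "guid"), ("sas_active", "guid"), ("rcs_active", "guid"), ("sas_mode", "guid"), ("sas_target_vec", "guid"), ("leg_deploy_progress", "guid"), ("suicide_burn_locked", "guid"), ("show_absolute_time", "guid"), ("pid_vert", "guid"), ("pid_pos", "guid"), ("pid_att", "guid"), ("pid_att_z", "guid"), ("pid_att_roll", "guid"), ("maneuvers", "mnv"), ("selected_maneuver_index", "mnv"), ("predicted_path", "orb"), ("predicted_mnv_path", "orb"), ("predicted_ground_track", "orb"), ("last_prediction_sim_time", "orb"), ("prediction_in_progress", "orb"), ("path_mutex", "orb"), ("predicted_apsides", "orb"), ("predicted_mnv_apsides", "orb")]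
-- module constant SORTED_FIELDS = sorted(FIELD_MAP.keys(), key=len, reverse=True)
def pvSortedFields : List String := PySem.List.sorted pvFieldMap.keys (fun f => PySem.Str.len f) true
def replace_rs_fields (content : String) (filename : String) : String × Int :=
  pvSortedFields.foldl (fun st field =>
    let comp := (pvFieldMap.get? field).getD ""   -- FIELD_MAP[field]; every field of SORTED_FIELDS is a key, so get? is always some
    let old := "rocket_state." ++ field
    let nw := comp ++ "." ++ field
    let occ : Int := (PySem.Str.count st.1 old : Int)
    if occ > 0 then (PySem.Str.replace st.1 old nw, st.2 + occ) else st) (content, 0)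

-- ===== PORT B =====
-- module constant FIELD_SPEC: compact "field:component" entries, longest field first
def pvSpecB : List String := ["last_prediction_sim_time:orb", "selected_maneuver_index:mnv", "predicted_ground_track:orb", "prediction_in_progress:orb", "fuel_consumption_rate:prop", "predicted_mnv_apsides:orb", "attitude_initialized:att", "leg_deploy_progress:guid", "suicide_burn_locked:guid", "show_absolute_time:guid", "predicted_mnv_path:orb", "predicted_apsides:orb", "launch_longitude:trans", "terrain_altitude:tele", "launch_latitude:trans", "jettisoned_mass:prop", "solar_occlusion:tele", "launch_site_px:trans", "launch_site_py:trans", "launch_site_pz:trans", "sas_target_vec:guid", "predicted_path:orb", "current_stage:prop", "mission_phase:guid", "mission_timer:guid", "acceleration:vel", "ang_vel_roll:att", "total_stages:prop", "thrust_power:prop", "pid_att_roll:guid", "stage_fuels:prop", "mission_msg:guid", "angle_roll:att", "sas_active:guid", "rcs_active:guid", "path_mutex:orb", "ang_vel_z:att", "auto_mode:guid", "pid_att_z:guid", "maneuvers:mnv", "attitude:att", "sim_time:tele", "altitude:tele", "velocity:tele", "local_vx:tele", "sas_mode:guid", "pid_vert:guid", "surf_px:trans", "surf_py:trans", "surf_pz:trans",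 "ang_vel:att", "angle_z:att", "pid_pos:guid", "pid_att:guid", "abs_px:trans", "abs_py:trans", "abs_pz:trans", "abs_vx:vel", "abs_vy:vel", "abs_vz:vel", "status:guid", "angle:att", "fuel:prop", "px:trans", "py:trans", "pz:trans", "vx:vel", "vy:vel", "vz:vel"]
-- module constant PAIRS = [tuple(entry.split(":")) for entry in FIELD_SPEC]
def pvPairsB : List (String × String) :=
  pvSpecB.map (fun e =>
    match PySem.Str.split? e ":" with
    | some [f, c] => (f, c)
    | _ => ("", ""))   -- unreachable: every entry contains exactly one ':'
def replace_rs_fields_alt (content : String) (filename : String) : String × Int :=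
  match PySem.Str.split? content "rocket_state." with
  | none => ("", 0)  -- unreachable: the separator "rocket_state." is nonempty
  | some parts =>
    match parts with
    | [] => ("", 0)  -- unreachable: str.split always returns at least one part
    | p0 :: rest =>
      let st := rest.foldl (fun (st : List String × Int) part =>
        match pvPairsB.find? (fun fc => PySem.Str.startswith part fc.1) with
        | none    => (st.1 ++ ["rocket_state." ++ part], st.2)
        | some fc => (st.1 ++ [fc.2 ++ "." ++ part], st.2 + 1)) ([p0], 0)
      (PySem.Str.join "" st.1, st.2)

-- ===== PRECONDITION & SPEC =====
-- D_ helpers: the component text that stands (or will stand) at the head of the NEXT reference once the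
-- first j fields have been processed -- a static table lookup on the input fragments, built from the same
-- module constants the two programs share.
def pvHeadS (j : Nat) (q : String) : String :=
  match (pvSortedFields.take j).find? (fun f => PySem.Str.startswith q f) with
  | some g => (pvFieldMap.get? g).getD ""
  | none => "rocket_state"
def pvBridgeS (p q : String) : Bool :=
  pvSortedFields.zipIdx.any (fun fj =>
    PySem.Str.startswith fj.1 p && decide (p.toList.length < fj.1.toList.length) &&
      (fj.1.toList.drop p.toList.length).isPrefixOf (pvHeadS fj.2 q).toList)
def pvDcond (content : String) : Bool :=
  let ps := ((PySem.Str.split? content "rocket_state.").getD []).tail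
  (ps.zip ps.tail).any (fun pq => pvBridgeS pq.1 pq.2)
-- Pre_ excludes contents with OVERLAPPING references: a "rocket_state." anchor followed by a proper prefix of a
-- field whose missing tail is spelled out by the start of the next reference's raw or already-rewritten text
-- (e.g. "rocket_state.mission_timerocket_state.px"); which of the two overlapping occurrences is rewritten is
-- unspecified there, and A's sequential passes and B's left-to-right scan make different defensible choices.
def Pre_replace_rs_fields (content : String) (filename : String) : Prop := pvDcond content = false
instance (content : String) (filename : String) : Decidable (Pre_replace_rs_fields content filename) := by
  unfold Pre_replace_rs_fields; infer_instance
def pvWitness_replace_rs_fields : String × String := ("x = rocket_state.px", "sim.py")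
def Spec_replace_rs_fields (content : String) (filename : String) (out : String × Int) : Prop :=
  out = replace_rs_fields_alt content filename
instance (content : String) (filename : String) (out : String × Int) : Decidable (Spec_replace_rs_fields content filename out) := by
  unfold Spec_replace_rs_fields; infer_instance

-- ===== CLAIM (what is proved, stated in full; the proofs are below) =====
def Claim_equal_replace_rs_fields : Prop := ∀ (content : String) (filename : String), Dom_replace_rs_fields content filename → Pre_replace_rs_fields content filename → Spec_replace_rs_fields content filename (replace_rs_fields content filename)

-- ===== LEMMAS AND PROOFS =====

def pvATl : List Char := "ocket_state.".toList
def pvFieldsS : List (String × String) := [("last_prediction_sim_time", "orb"), ("selected_maneuver_index", "mnv"), ("predicted_ground_track", "orb"), ("prediction_in_progress", "orb"), ("fuel_consumption_rate", "prop"), ("predicted_mnv_apsides", "orb"), ("attitude_initialized", "att"), ("leg_deploy_progress", "guid"), ("suicide_burn_locked", "guid"), ("show_absolute_time", "guid"), ("predicted_mnv_path", "orb"), ("predicted_apsides", "orb"), ("launch_longitude", "trans"), ("terrain_altitude", "tele"), ("launch_latitude", "trans"), ("jettisoned_mass", "prop"), ("solar_occlusion", "tele"), ("launch_site_px", "trans"),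 ("launch_site_py", "trans"), ("launch_site_pz", "trans"), ("sas_target_vec", "guid"), ("predicted_path", "orb"), ("current_stage", "prop"), ("mission_phase", "guid"), ("mission_timer", "guid"), ("acceleration", "vel"), ("ang_vel_roll", "att"), ("total_stages", "prop"), ("thrust_power", "prop"), ("pid_att_roll", "guid"), ("stage_fuels", "prop"), ("mission_msg", "guid"), ("angle_roll", "att"), ("sas_active", "guid"), ("rcs_active", "guid"), ("path_mutex", "orb"), ("ang_vel_z", "att"), ("auto_mode", "guid"), ("pid_att_z", "guid"), ("maneuvers", "mnv"), ("attitude", "att"), ("sim_time", "tele"), ("altitude", "tele"), ("velocity", "tele"), ("local_vx", "tele"), ("sas_mode", "guid"), ("pid_vert", "guid"), ("surf_px", "trans"), ("surf_py", "trans"), ("surf_pz", "trans"), ("ang_vel", "att"), ("angle_z", "att"), ("pid_pos", "guid"), ("pid_att", "guid"), ("abs_px", "trans"), ("abs_py", "trans"), ("abs_pz", "trans"), ("abs_vx", "vel"), ("abs_vy", "vel"), ("abs_vz", "vel"), ("status", "guid"), ("angle", "att"), ("fuel", "prop"), ("px", "trans"), ("py", "trans"), ("pz", "trans"), ("vx",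 "vel"), ("vy", "vel"), ("vz", "vel")]

def pvFieldsC : List (List Char × List Char) := pvFieldsS.map (fun p => (p.1.toList, p.2.toList))

def pvAC : List Char := "rocket_state.".toList
def pvRSC : List Char := "rocket_state".toList
def pvMatch (n : Nat) (p : List Char) : Option (List Char × List Char) :=
  (pvFieldsC.take n).find? (fun fc => fc.1.isPrefixOf p)
def pvHead (n : Nat) (p : List Char) : List Char :=
  match pvMatch n p with | some fc => fc.2 | none => pvRSC
def pvBridge (p q : List Char) : Bool :=
  pvFieldsC.zipIdx.any (fun fj =>
    p.isPrefixOf fj.1.1 && decide (p.length < fj.1.1.length) &&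
      (fj.1.1.drop p.length).isPrefixOf (pvHead fj.2 q))



def pvRepl (o : Char) (pr nw : List Char) : List Char → List Char
  | [] => []
  | c :: t =>
    if (o :: pr).isPrefixOf (c :: t) then nw ++ pvRepl o pr nw (t.drop pr.length)
    else c :: pvRepl o pr nw t
  termination_by l => l.length
  decreasing_by all_goals simp [List.length_drop]

def pvCnt (o : Char) (pr : List Char) : List Char → Nat
  | [] => 0
  | c :: t =>
    if (o :: pr).isPrefixOf (c :: t) then pvCnt o pr (t.drop pr.length) + 1
    else pvCnt o pr t
  termination_by l => l.length
  decreasing_by all_goals simp [List.length_drop]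

def pvSplitC (o : Char) (pr : List Char) : List Char → List (List Char)
  | [] => [[]]
  | c :: t =>
    if (o :: pr).isPrefixOf (c :: t) then [] :: pvSplitC o pr (t.drop pr.length)
    else match pvSplitC o pr t with
         | [] => [[c]]
         | h :: r => (c :: h) :: r
  termination_by l => l.length
  decreasing_by all_goals simp [List.length_drop]

theorem replace_go_eq (o : Char) (pr nw : List Char) :
    ∀ fuel (l acc : List Char), l.length ≤ fuel →
      PySem.Chars.replace.go (o :: pr) nw fuel l acc = acc.reverse ++ pvRepl o pr nw l := by
  intro fuel
  induction fuel with
  | zero => intro l acc h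
            have : l = [] := by simpa using List.eq_nil_of_length_eq_zero (Nat.le_zero.mp h)
            subst this
            simp [PySem.Chars.replace.go, pvRepl]
  | succ n ih =>
      intro l acc h
      cases l with
      | nil => simp [PySem.Chars.replace.go, pvRepl]
      | cons c t =>
        rw [PySem.Chars.replace.go]
        by_cases hp : (o :: pr).isPrefixOf (c :: t) = true
        · simp only [hp, if_true]
          rw [ih _ _ (by simp at h ⊢; omega), pvRepl]
          simp [hp]
        · rw [if_neg hp, ih _ _ (by simp at h ⊢; omega), pvRepl]
          simp [hp]

theorem count_go_eq (o : Char) (pr : List Char) :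
    ∀ fuel (l : List Char) (acc : Nat), l.length ≤ fuel →
      PySem.Chars.count.go (o :: pr) fuel l acc = acc + pvCnt o pr l := by
  intro fuel
  induction fuel with
  | zero => intro l acc h
            have : l = [] := by simpa using List.eq_nil_of_length_eq_zero (Nat.le_zero.mp h)
            subst this
            simp [PySem.Chars.count.go, pvCnt]
  | succ n ih =>
      intro l acc h
      cases l with
      | nil => simp [PySem.Chars.count.go, pvCnt]
      | cons c t =>
        rw [PySem.Chars.count.go]
        by_cases hp : (o :: pr).isPrefixOf (c :: t) = true
        · rw [if_pos hp, ih _ _ (by simp at h ⊢; omega), pvCnt]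
          simp [hp]; omega
        · rw [if_neg hp, ih _ _ (by simp at h ⊢; omega), pvCnt]
          simp [hp]

def pvPrep (x : List Char) : List (List Char) → List (List Char)
  | [] => [x]
  | h :: r => (x ++ h) :: r

theorem pvSplitC_ne_nil (o : Char) (pr l : List Char) : pvSplitC o pr l ≠ [] := by
  induction l using pvSplitC.induct o pr with
  | case1 => simp [pvSplitC]
  | case2 c t hp ih => simp [pvSplitC, hp]
  | case3 c t hp hs ih => rw [pvSplitC]; simp [hp, hs]
  | case4 c t hp h r hs ih => rw [pvSplitC]; simp [hp, hs]

theorem splitOn_go_eq (o : Char) (pr : List Char) :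
    ∀ fuel (l cur : List Char) (acc : List (List Char)), l.length ≤ fuel →
      PySem.Chars.splitOn.go (o :: pr) fuel l cur acc
        = acc.reverse ++ pvPrep cur.reverse (pvSplitC o pr l) := by
  intro fuel
  induction fuel with
  | zero => intro l cur acc h
            have : l = [] := by simpa using List.eq_nil_of_length_eq_zero (Nat.le_zero.mp h)
            subst this
            simp [PySem.Chars.splitOn.go, pvSplitC, pvPrep]
  | succ n ih =>
      intro l cur acc h
      cases l with
      | nil => simp [PySem.Chars.splitOn.go, pvSplitC, pvPrep]
      | cons c t =>
        rw [PySem.Chars.splitOn.go]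
        by_cases hp : (o :: pr).isPrefixOf (c :: t) = true
        · rw [if_pos hp, ih _ _ _ (by simp at h ⊢; omega)]
          rw [pvSplitC]
          simp only [hp, if_true, pvPrep]
          cases hs : pvSplitC o pr (t.drop pr.length) with
          | nil => exact absurd hs (pvSplitC_ne_nil o pr _)
          | cons h' r' => simp [hs]
        · rw [if_neg hp, ih _ _ _ (by simp at h ⊢; omega)]
          rw [pvSplitC]
          simp only [hp, if_false]
          cases hs : pvSplitC o pr t with
          | nil => exact absurd hs (pvSplitC_ne_nil o pr t)
          | cons h' r' => simp [hs, pvPrep]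

theorem chars_replace_eq (o : Char) (pr nw s : List Char) :
    PySem.Chars.replace s (o :: pr) nw = pvRepl o pr nw s := by
  rw [PySem.Chars.replace, replace_go_eq o pr nw s.length s [] le_rfl]
  simp

theorem chars_count_eq (o : Char) (pr s : List Char) :
    PySem.Chars.count s (o :: pr) = pvCnt o pr s := by
  rw [PySem.Chars.count, count_go_eq o pr s.length s 0 le_rfl]
  simp

theorem chars_splitOn_eq (o : Char) (pr s : List Char) :
    PySem.Chars.splitOn s (o :: pr) = pvSplitC o pr s := by
  rw [PySem.Chars.splitOn]
  rw [splitOn_go_eq o pr (s.length + 1) s [] [] (by omega)]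
  cases hs : pvSplitC o pr s with
  | nil => exact absurd hs (pvSplitC_ne_nil o pr s)
  | cons h' r' => simp [pvPrep]

theorem pvSplitC_join (o : Char) (pr : List Char) :
    ∀ l : List Char, l = ((pvSplitC o pr l).headI)
        ++ (((pvSplitC o pr l).tail).map (fun p => (o :: pr) ++ p)).flatten := by
  intro l
  induction l using pvSplitC.induct o pr with
  | case1 => simp [pvSplitC]
  | case2 c t hp ih =>
      rw [pvSplitC, if_pos hp]
      obtain ⟨z, hz⟩ := List.isPrefixOf_iff_prefix.mp hp
      have hzd : z = t.drop pr.length := by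
        have := congrArg (List.drop (pr.length + 1)) hz
        simpa [List.drop_left'] using this
      cases hs : pvSplitC o pr (t.drop pr.length) with
      | nil => exact absurd hs (pvSplitC_ne_nil o pr _)
      | cons h' r' =>
        rw [hs] at ih
        simp only [List.headI, List.tail, List.map_cons, List.flatten_cons]
        rw [← hz, hzd]
        simp only [List.headI, List.tail] at ih
        conv_lhs => rw [ih]
        simp
  | case3 c t hp hs ih => exact absurd hs (pvSplitC_ne_nil o pr t)
  | case4 c t hp h' r' hs ih =>
      rw [pvSplitC, if_neg hp, hs]
      rw [hs] at ih
      simp only [List.headI, List.tail] at ih ⊢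
      conv_lhs => rw [show c :: t = c :: (h' ++ (r'.map (fun p => (o :: pr) ++ p)).flatten) from by rw [← ih]]
      simp

theorem pvSplitC_headI_prefix (o : Char) (pr : List Char) :
    ∀ l : List Char, (pvSplitC o pr l).headI <+: l := by
  intro l
  induction l using pvSplitC.induct o pr with
  | case1 => simp [pvSplitC]
  | case2 c t hp ih => rw [pvSplitC, if_pos hp]; simp
  | case3 c t hp hs ih => exact absurd hs (pvSplitC_ne_nil o pr t)
  | case4 c t hp h' r' hs ih =>
      rw [pvSplitC, if_neg hp, hs]
      rw [hs] at ih
      simp only [List.headI] at ih ⊢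
      exact (List.prefix_cons_inj c).mpr ih

theorem pvSplitC_no_infix (o : Char) (pr : List Char) :
    ∀ l : List Char, ∀ p ∈ pvSplitC o pr l, ¬ ((o :: pr) <:+: p) := by
  intro l
  induction l using pvSplitC.induct o pr with
  | case1 => intro p hp
             rw [pvSplitC] at hp
             simp at hp
             subst hp
             simp
  | case2 c t hp ih =>
      intro p hmem
      rw [pvSplitC, if_pos hp] at hmem
      rcases List.mem_cons.mp hmem with h | h
      · subst h; simp
      · exact ih p h
  | case3 c t hp hs ih => exact absurd hs (pvSplitC_ne_nil o pr t)
  | case4 c t hp h' r' hs ih =>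
      intro p hmem
      rw [pvSplitC, if_neg hp, hs] at hmem
      rcases List.mem_cons.mp hmem with h | h
      · subst h
        intro hinf
        rcases List.infix_cons_iff.mp hinf with hpre | hinf'
        · -- (o::pr) <+: c :: h' and c :: h' <+: c :: t
          have hh : (c :: h') <+: (c :: t) := by
            have := pvSplitC_headI_prefix o pr t
            rw [hs] at this
            simpa [List.headI] using (List.prefix_cons_inj c).mpr this
          exact absurd (List.isPrefixOf_iff_prefix.mpr (hpre.trans hh)) (by simpa using hp)
        · exact ih h' (by rw [hs]; simp) hinf'
      · exact ih p (by rw [hs]; exact List.mem_cons_of_mem _ h)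

theorem pv_prefix_trunc {α : Type} {u w z : List α} (h : u <+: w ++ z) (hl : u.length ≤ w.length) :
    u <+: w :=
  List.prefix_of_prefix_length_le h (List.prefix_append w z) hl

theorem pv_prefix_drop {α : Type} {w u : List α} {z : List α} (h1 : w <+: u) (h2 : u <+: w ++ z) :
    u.drop w.length <+: z := by
  obtain ⟨t, rfl⟩ := h1
  rw [List.drop_left]
  exact (List.prefix_append_right_inj w).mp h2

theorem pv_nodot_prefix {y H z : List Char} (hy : '.' ∉ y) (h : y <+: H ++ '.' :: z)
    (hH : '.' ∉ H) : y <+: H := by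
  by_cases hl : y.length ≤ H.length
  · exact pv_prefix_trunc h hl
  · exfalso
    have hd : (H ++ ['.']) <+: y := by
      apply List.prefix_of_prefix_length_le _ h (by simp; omega)
      simpa using (List.prefix_append_right_inj H).mpr (List.prefix_cons_self '.' z)
    exact hy (hd.subset (by simp))


def pvCompsC : List (List Char) :=
  ["att".toList, "guid".toList, "mnv".toList, "orb".toList, "prop".toList, "tele".toList, "trans".toList, "vel".toList]
def pvHeadsC : List (List Char) := pvRSC :: pvCompsC

theorem pvF_comp : ∀ fc ∈ pvFieldsC, fc.2 ∈ pvCompsC := by decide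
theorem pvF_nodotF : ∀ fc ∈ pvFieldsC, '.' ∉ fc.1 := by decide
theorem pvF_nodotH : ∀ H ∈ pvHeadsC, '.' ∉ H := by decide
theorem pvF_Hlen : ∀ H ∈ pvHeadsC, H.length ≤ 12 := by decide
theorem pvF_sfx : ∀ H ∈ pvHeadsC, ∀ w ∈ H.tails, w ≠ H → ¬ ((w ++ ['.']) <+: pvAC) := by decide
theorem pvF0 : ∀ H ∈ pvCompsC, ¬ ((H ++ ['.']) <+: pvAC) := by decide
theorem pvF_dropA : ∀ k ∈ List.range 13, 1 ≤ k →
    ('.' ∈ pvAC.drop k ∧ ∀ H ∈ pvHeadsC, ¬ ((H ++ ['.']) <+: pvAC.drop k)) := by decide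
theorem pvAC_len : pvAC.length = 13 := by decide
theorem pvAC_cons : pvAC = 'r' :: pvATl := by decide
theorem pvAC_snoc : pvAC = pvRSC ++ ['.'] := by decide

def pvRestShape (v : List Char) : Prop := v = [] ∨ ∃ H z, H ∈ pvHeadsC ∧ v = H ++ '.' :: z

theorem pv_noA_part (p v : List Char) (hinf : ¬ (pvAC <:+: p)) (hv : pvRestShape v) :
    ∀ i, i < p.length → ¬ pvAC <+: (p.drop i ++ v) := by
  intro i hi hpre
  by_cases hc : pvAC.length ≤ (p.drop i).length
  · exact hinf (((pv_prefix_trunc hpre hc).isInfix).trans (p.drop_suffix i).isInfix)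
  · push_neg at hc
    rw [pvAC_len] at hc
    have hld : (List.drop i p).length = p.length - i := by simp
    have hwA : (p.drop i) <+: pvAC :=
      List.prefix_of_prefix_length_le (List.prefix_append _ v) hpre (by rw [pvAC_len]; omega)
    have hu : pvAC.drop (p.drop i).length <+: v := pv_prefix_drop hwA hpre
    have hk1 : 1 ≤ (p.drop i).length := by omega
    have hk2 : (p.drop i).length ≤ 12 := by omega
    rcases hv with rfl | ⟨H, z, hH, rfl⟩
    · have h0 : pvAC.drop (p.drop i).length = [] := List.prefix_nil.mp hu
      have := congrArg List.length h0
      simp only [List.length_drop, List.length_nil, pvAC_len] at this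
      omega
    · obtain ⟨hdot, hnp⟩ := pvF_dropA (p.drop i).length (by rw [List.mem_range]; omega) hk1
      by_cases hlen : (pvAC.drop (p.drop i).length).length ≤ H.length
      · exact pvF_nodotH H hH ((pv_prefix_trunc hu hlen).subset hdot)
      · refine hnp H hH ?_
        push_neg at hlen
        refine List.prefix_of_prefix_length_le ?_ hu ?_
        · simpa using (List.prefix_append_right_inj H).mpr
            (List.cons_prefix_cons.mpr ⟨rfl, List.nil_prefix⟩)
        · simp only [List.length_append, List.length_cons, List.length_nil]
          omega

theorem pv_noA_seg (H p v : List Char) (hH : H ∈ pvHeadsC) (hinf : ¬ (pvAC <:+: p))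
    (hv : pvRestShape v) :
    ∀ j, 1 ≤ j → j < (H ++ '.' :: p).length → ¬ pvAC <+: ((H ++ '.' :: p).drop j ++ v) := by
  intro j hj1 hjl hpre
  by_cases hc : j ≤ H.length
  · rw [List.drop_append_of_le_length hc] at hpre
    have hform : H.drop j ++ '.' :: p ++ v = (H.drop j ++ ['.']) ++ (p ++ v) := by simp
    rw [hform] at hpre
    have hlen : (H.drop j ++ ['.']).length ≤ pvAC.length := by
      have := pvF_Hlen H hH
      simp [pvAC_len]
      omega
    have hup : (H.drop j ++ ['.']) <+: pvAC :=
      List.prefix_of_prefix_length_le (List.prefix_append _ _) hpre hlen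
    refine pvF_sfx H hH (H.drop j) (by rw [List.mem_tails]; exact H.drop_suffix j) ?_ hup
    intro heq
    have := congrArg List.length heq
    rw [List.length_drop] at this
    omega
  · push_neg at hc
    obtain ⟨m, rfl⟩ : ∃ m, j = (H ++ ['.']).length + m := ⟨j - H.length - 1, by simp; omega⟩
    rw [show (H ++ '.' :: p) = (H ++ ['.']) ++ p by simp, List.drop_append] at hpre
    have hm : m < p.length := by simp at hjl; omega
    have hpre' : pvAC <+: List.drop m p ++ v := by
      simpa [List.drop_eq_nil_of_le] using hpre
    exact pv_noA_part p v hinf hv m hm hpre'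

theorem pvRepl_skip (o : Char) (pr nw : List Char) :
    ∀ u v, (∀ j, j < u.length → ¬ ((o :: pr) <+: (u.drop j ++ v))) →
      pvRepl o pr nw (u ++ v) = u ++ pvRepl o pr nw v := by
  intro u
  induction u with
  | nil => intro v _; simp
  | cons c u' ih =>
      intro v h
      rw [List.cons_append, pvRepl]
      have h0 : ¬ ((o :: pr).isPrefixOf (c :: (u' ++ v)) = true) := by
        rw [List.isPrefixOf_iff_prefix]
        exact fun hp => h 0 (by simp) (by simpa using hp)
      rw [if_neg h0, ih v (fun j hj => by simpa using h (j + 1) (by simp; omega))]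
      simp

theorem pvCnt_skip (o : Char) (pr : List Char) :
    ∀ u v, (∀ j, j < u.length → ¬ ((o :: pr) <+: (u.drop j ++ v))) →
      pvCnt o pr (u ++ v) = pvCnt o pr v := by
  intro u
  induction u with
  | nil => intro v _; simp
  | cons c u' ih =>
      intro v h
      rw [List.cons_append, pvCnt]
      have h0 : ¬ ((o :: pr).isPrefixOf (c :: (u' ++ v)) = true) := by
        rw [List.isPrefixOf_iff_prefix]
        exact fun hp => h 0 (by simp) (by simpa using hp)
      rw [if_neg h0, ih v (fun j hj => by simpa using h (j + 1) (by simp; omega))]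

def pvRend (n : Nat) (p : List Char) : List Char := pvHead n p ++ '.' :: p
def pvBody (n : Nat) (ps : List (List Char)) : List Char := (ps.map (pvRend n)).flatten
def pvCountN (n : Nat) (ps : List (List Char)) : Nat := ps.countP (fun p => (pvMatch n p).isSome)

theorem pvPat_eq (f : List Char) : 'r' :: (pvATl ++ f) = pvAC ++ f := by rw [pvAC_cons]; rfl

theorem pvMatch_mem {n : Nat} {p : List Char} {gc : List Char × List Char}
    (h : pvMatch n p = some gc) : gc ∈ pvFieldsC :=
  (pvFieldsC.take_subset n) (List.mem_of_find?_eq_some h)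

theorem pvHead_mem (n : Nat) (p : List Char) : pvHead n p ∈ pvHeadsC := by
  unfold pvHead
  cases h : pvMatch n p with
  | none => exact List.mem_cons_self
  | some gc => exact List.mem_cons_of_mem _ (pvF_comp gc (pvMatch_mem h))

theorem pvRend_anchor {n : Nat} {p : List Char} (h : pvMatch n p = none) :
    pvRend n p = pvAC ++ p := by
  unfold pvRend pvHead
  rw [h, pvAC_snoc]
  simp

theorem pvRend_matched {n : Nat} {p : List Char} {gc : List Char × List Char}
    (h : pvMatch n p = some gc) : pvRend n p = gc.2 ++ '.' :: p := by
  unfold pvRend pvHead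
  rw [h]

theorem pvBody_shape (n : Nat) (ps : List (List Char)) : pvRestShape (pvBody n ps) := by
  cases ps with
  | nil => exact Or.inl rfl
  | cons p ps' =>
      refine Or.inr ⟨pvHead n p, p ++ pvBody n ps', pvHead_mem n p, ?_⟩
      simp [pvBody, pvRend]

theorem pvMatch_succ {n : Nat} {fc : List Char × List Char} (hfc : pvFieldsC[n]? = some fc)
    (p : List Char) :
    pvMatch (n + 1) p = (pvMatch n p).or (if fc.1.isPrefixOf p then some fc else none) := by
  unfold pvMatch
  rw [List.take_add_one, hfc, List.find?_append]
  simp [List.find?]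

theorem pvBody_cons (n : Nat) (p : List Char) (ps : List (List Char)) :
    pvBody n (p :: ps) = pvRend n p ++ pvBody n ps := by simp [pvBody]

-- the main pass lemma: one count+replace pass of field n turns the stage-n rendering into the stage-(n+1) rendering
theorem pv_pass (n : Nat) (fc : List Char × List Char) (hfc : pvFieldsC[n]? = some fc) :
    ∀ ps : List (List Char),
      (∀ p ∈ ps, ¬ (pvAC <:+: p)) →
      (∀ pq ∈ ps.zip ps.tail, pvBridge pq.1 pq.2 = false) →
      pvRepl 'r' (pvATl ++ fc.1) (fc.2 ++ '.' :: fc.1) (pvBody n ps) = pvBody (n + 1) ps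
      ∧ pvCnt 'r' (pvATl ++ fc.1) (pvBody n ps)
          = ps.countP (fun p => !(pvMatch n p).isSome && fc.1.isPrefixOf p) := by
  intro ps
  induction ps with
  | nil => intro _ _; constructor <;> simp [pvBody, pvRepl, pvCnt]
  | cons p ps' ih =>
    intro hmem hbr
    have hshape : pvRestShape (pvBody n ps') := pvBody_shape n ps'
    have hpinf : ¬ pvAC <:+: p := hmem p List.mem_cons_self
    have ihm : ∀ q ∈ ps', ¬ (pvAC <:+: q) := fun q hq => hmem q (List.mem_cons_of_mem _ hq)
    have ihb : ∀ pq ∈ ps'.zip ps'.tail, pvBridge pq.1 pq.2 = false := by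
      intro pq hpq
      refine hbr pq ?_
      cases ps' with
      | nil => simp at hpq
      | cons q qs => simpa [List.zip] using List.mem_cons_of_mem _ (by simpa [List.zip] using hpq)
    obtain ⟨ihr, ihc⟩ := ih ihm ihb
    have hnopat : ∀ X : List Char, ¬ pvAC <+: X → ¬ ('r' :: (pvATl ++ fc.1)) <+: X := by
      intro X hX hp
      rw [pvPat_eq] at hp
      exact hX ((List.prefix_append pvAC fc.1).trans hp)
    cases hm : pvMatch n p with
    | some gc =>
      -- the fragment is already rewritten: the pass scans straight through it
      have hmem2 : gc ∈ pvFieldsC := pvMatch_mem hm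
      have hcomp : gc.2 ∈ pvHeadsC := List.mem_cons_of_mem _ (pvF_comp gc hmem2)
      have hskip : ∀ j, j < (gc.2 ++ '.' :: p).length →
          ¬ ('r' :: (pvATl ++ fc.1)) <+: ((gc.2 ++ '.' :: p).drop j ++ pvBody n ps') := by
        intro j hj
        refine hnopat _ ?_
        rcases Nat.eq_zero_or_pos j with rfl | hj1
        · intro hp
          simp only [List.drop_zero] at hp
          rw [show gc.2 ++ '.' :: p ++ pvBody n ps' = (gc.2 ++ ['.']) ++ (p ++ pvBody n ps') by simp] at hp
          have hl : (gc.2 ++ ['.']).length ≤ pvAC.length := by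
            have := pvF_Hlen gc.2 hcomp
            simp [pvAC_len]; omega
          exact pvF0 gc.2 (pvF_comp gc hmem2)
            (List.prefix_of_prefix_length_le (List.prefix_append _ _) hp hl)
        · exact pv_noA_seg gc.2 p (pvBody n ps') hcomp hpinf hshape j hj1 hj
      have hsucc : pvMatch (n + 1) p = some gc := by
        rw [pvMatch_succ hfc p, hm]; rfl
      constructor
      · rw [pvBody_cons, pvRend_matched hm, List.append_assoc ((gc.2 : List Char)) ('.' :: p) (pvBody n ps'),
            show (gc.2 : List Char) ++ ('.' :: p ++ pvBody n ps') = (gc.2 ++ '.' :: p) ++ pvBody n ps' by simp]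
        rw [pvRepl_skip _ _ _ _ _ hskip, ihr, pvBody_cons, pvRend_matched hsucc]
      · rw [pvBody_cons, pvRend_matched hm,
            show (gc.2 : List Char) ++ '.' :: p ++ pvBody n ps' = (gc.2 ++ '.' :: p) ++ pvBody n ps' by simp]
        rw [pvCnt_skip _ _ _ _ hskip, ihc, List.countP_cons]
        simp [hm]
    | none =>
      have hanchor : pvBody n (p :: ps') = pvAC ++ (p ++ pvBody n ps') := by
        rw [pvBody_cons, pvRend_anchor hm]; simp
      by_cases hf : fc.1.isPrefixOf p = true
      · -- this pass rewrites the fragment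
        obtain ⟨pt, hpt⟩ := List.isPrefixOf_iff_prefix.mp hf
        have hsucc : pvMatch (n + 1) p = some fc := by
          rw [pvMatch_succ hfc p, hm, hf]; rfl
        have hptinf : ¬ pvAC <:+: pt := by
          intro hx
          exact hpinf (hx.trans ⟨fc.1, [], by simpa using hpt⟩)
        have hskip2 : ∀ j, j < pt.length →
            ¬ ('r' :: (pvATl ++ fc.1)) <+: (pt.drop j ++ pvBody n ps') := by
          intro j hj
          exact hnopat _ (pv_noA_part pt (pvBody n ps') hptinf hshape j hj)
        have hbody : pvBody n (p :: ps')
            = 'r' :: ((pvATl ++ fc.1) ++ (pt ++ pvBody n ps')) := by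
          rw [hanchor, ← hpt, pvAC_cons]
          simp
        constructor
        · rw [hbody, pvRepl]
          rw [if_pos (by rw [List.isPrefixOf_iff_prefix]; exact ⟨pt ++ pvBody n ps', by simp⟩)]
          rw [show ((pvATl ++ fc.1) ++ (pt ++ pvBody n ps')).drop (pvATl ++ fc.1).length
                = pt ++ pvBody n ps' from List.drop_left]
          rw [pvRepl_skip _ _ _ _ _ hskip2, ihr, pvBody_cons, pvRend_matched hsucc, ← hpt]
          simp
        · rw [hbody, pvCnt]
          rw [if_pos (by rw [List.isPrefixOf_iff_prefix]; exact ⟨pt ++ pvBody n ps', by simp⟩)]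
          rw [show ((pvATl ++ fc.1) ++ (pt ++ pvBody n ps')).drop (pvATl ++ fc.1).length
                = pt ++ pvBody n ps' from List.drop_left]
          rw [pvCnt_skip _ _ _ _ hskip2, ihc, List.countP_cons]
          simp [hm, hf]
      · -- the field does not match here: with no bridge, the pass leaves the fragment alone
        have hnew : ¬ ('r' :: (pvATl ++ fc.1)) <+: (pvAC ++ (p ++ pvBody n ps')) := by
          rw [pvPat_eq]
          intro hp
          have hfp : fc.1 <+: p ++ pvBody n ps' := (List.prefix_append_right_inj pvAC).mp hp
          by_cases hl : fc.1.length ≤ p.length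
          · exact hf (List.isPrefixOf_iff_prefix.mpr (pv_prefix_trunc hfp hl))
          · push_neg at hl
            have hpp : p <+: fc.1 :=
              List.prefix_of_prefix_length_le (List.prefix_append _ _) hfp (by omega)
            have hy : fc.1.drop p.length <+: pvBody n ps' := pv_prefix_drop hpp hfp
            cases hps' : ps' with
            | nil =>
              rw [hps'] at hy
              have h0 : fc.1.drop p.length = [] := List.prefix_nil.mp (by simpa [pvBody] using hy)
              have := congrArg List.length h0
              simp at this
              omega
            | cons q qs =>
              have hyq : fc.1.drop p.length <+: pvHead n q ++ '.' :: (q ++ pvBody n qs) := by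
                rw [hps'] at hy
                simpa [pvBody_cons, pvRend] using hy
              have hnodot : '.' ∉ fc.1.drop p.length := by
                intro hdot
                exact pvF_nodotF fc (by
                  have := List.mem_of_getElem? hfc
                  exact this) (List.drop_subset _ _ hdot)
              have hyH : fc.1.drop p.length <+: pvHead n q :=
                pv_nodot_prefix hnodot hyq (pvF_nodotH _ (pvHead_mem n q))
              have hbridge : pvBridge p q = true := by
                unfold pvBridge
                rw [List.any_eq_true]
                refine ⟨(fc, n), ?_, ?_⟩
                · have hn : n < pvFieldsC.length := by
                    rcases List.getElem?_eq_some_iff.mp hfc with ⟨h1, _⟩; exact h1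
                  have : pvFieldsC.zipIdx[n]? = some (fc, n) := by
                    rw [List.getElem?_zipIdx]
                    rw [hfc]
                    simp
                  exact List.mem_of_getElem? this
                · simp only [Bool.and_eq_true, decide_eq_true_eq]
                  exact ⟨⟨List.isPrefixOf_iff_prefix.mpr hpp, hl⟩,
                    List.isPrefixOf_iff_prefix.mpr hyH⟩
              have hfalse : pvBridge p q = false := by
                refine hbr (p, q) ?_
                rw [hps']
                simp [List.zip]
              rw [hbridge] at hfalse
              exact absurd hfalse (by decide)
        have hskip3 : ∀ j, j < (pvAC ++ p).length →
            ¬ ('r' :: (pvATl ++ fc.1)) <+: ((pvAC ++ p).drop j ++ pvBody n ps') := by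
          intro j hj
          rcases Nat.eq_zero_or_pos j with rfl | hj1
          · simpa using hnew
          · refine hnopat _ ?_
            have hseg : pvAC ++ p = pvRSC ++ '.' :: p := by rw [pvAC_snoc]; simp
            rw [hseg]
            exact pv_noA_seg pvRSC p (pvBody n ps') List.mem_cons_self hpinf hshape j hj1
              (by rw [← hseg]; exact hj)
        have hsucc : pvMatch (n + 1) p = none := by
          rw [pvMatch_succ hfc p, hm]
          simp [hf]
        constructor
        · rw [hanchor, show pvAC ++ (p ++ pvBody n ps') = (pvAC ++ p) ++ pvBody n ps' by simp]
          rw [pvRepl_skip _ _ _ _ _ hskip3, ihr, pvBody_cons, pvRend_anchor hsucc]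
        · rw [hanchor, show pvAC ++ (p ++ pvBody n ps') = (pvAC ++ p) ++ pvBody n ps' by simp]
          rw [pvCnt_skip _ _ _ _ hskip3, ihc, List.countP_cons]
          simp [hm, hf]

theorem pv_nopat (f X : List Char) (hX : ¬ pvAC <+: X) : ¬ ('r' :: (pvATl ++ f)) <+: X := by
  intro hp
  rw [pvPat_eq] at hp
  exact hX ((List.prefix_append pvAC f).trans hp)

set_option maxRecDepth 100000 in
theorem pv_sorted : pvSortedFields = pvFieldsS.map Prod.fst := by decide
set_option maxRecDepth 100000 in
theorem pv_comp_lookup : ∀ fc ∈ pvFieldsS, ((pvFieldMap.get? fc.1).getD "") = fc.2 := by decide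
set_option maxRecDepth 1000000 in
set_option maxHeartbeats 4000000 in
theorem pv_pairsB : pvPairsB = pvFieldsS := by rfl

theorem pv_lenC : pvFieldsC.length = pvFieldsS.length := by rw [pvFieldsC, List.length_map]

theorem pvCountN_succ {n : Nat} {fc : List Char × List Char} (hfc : pvFieldsC[n]? = some fc)
    (ps : List (List Char)) :
    pvCountN (n + 1) ps
      = pvCountN n ps + ps.countP (fun p => !(pvMatch n p).isSome && fc.1.isPrefixOf p) := by
  induction ps with
  | nil => simp [pvCountN]
  | cons p ps' ih =>
      unfold pvCountN at ih ⊢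
      rw [List.countP_cons, List.countP_cons, List.countP_cons, ih]
      rw [pvMatch_succ hfc p]
      cases hm : pvMatch n p with
      | some gc => simp [hm]; omega
      | none => by_cases hf : fc.1.isPrefixOf p = true <;> simp [hm, hf] <;> omega

theorem pvRend_stable {n : Nat} {fc : List Char × List Char} (hfc : pvFieldsC[n]? = some fc)
    {p : List Char} (h : (!(pvMatch n p).isSome && fc.1.isPrefixOf p) = false) :
    pvRend (n + 1) p = pvRend n p := by
  unfold pvRend pvHead
  rw [pvMatch_succ hfc p]
  cases hm : pvMatch n p with
  | some gc => rfl
  | none =>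
      rw [hm] at h
      simp at h
      simp [h]

theorem pvBody_stable {n : Nat} {fc : List Char × List Char} (hfc : pvFieldsC[n]? = some fc)
    {ps : List (List Char)}
    (h : ps.countP (fun p => !(pvMatch n p).isSome && fc.1.isPrefixOf p) = 0) :
    pvBody (n + 1) ps = pvBody n ps := by
  unfold pvBody
  congr 1
  refine List.map_congr_left ?_
  intro p hp
  exact pvRend_stable hfc (Bool.eq_false_iff.mpr (List.countP_eq_zero.mp h p hp))

-- A's per-field loop body, with the field argument projected from the (field, component) pair
def pvStep (st : String × Int) (fcS : String × String) : String × Int :=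
  let comp := (pvFieldMap.get? fcS.1).getD ""
  let old := "rocket_state." ++ fcS.1
  let nw := comp ++ "." ++ fcS.1
  let occ : Int := (PySem.Str.count st.1 old : Int)
  if occ > 0 then (PySem.Str.replace st.1 old nw, st.2 + occ) else st

theorem pv_A_fold (content filename : String) :
    replace_rs_fields content filename = pvFieldsS.foldl pvStep (content, 0) := by
  rw [replace_rs_fields, pv_sorted, List.foldl_map]
  rfl

theorem pvStep_eval {n : Nat} {fcS : String × String} (hS : pvFieldsS[n]? = some fcS)
    {p0 : List Char} {ps : List (List Char)}
    (hp0 : ¬ pvAC <:+: p0)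
    (hmemA : ∀ p ∈ ps, ¬ (pvAC <:+: p))
    (hbrs : ∀ pq ∈ ps.zip ps.tail, pvBridge pq.1 pq.2 = false)
    (s : String) (k : Int) (hs : s.toList = p0 ++ pvBody n ps) :
    (pvStep (s, k) fcS).1.toList = p0 ++ pvBody (n + 1) ps
    ∧ (pvStep (s, k) fcS).2 = k + ((pvCountN (n + 1) ps : Int) - (pvCountN n ps : Int)) := by
  have hfc : pvFieldsC[n]? = some (fcS.1.toList, fcS.2.toList) := by
    rw [pvFieldsC, List.getElem?_map, hS]
    rfl
  have hfcmem : fcS ∈ pvFieldsS := List.mem_of_getElem? hS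
  have hold : ("rocket_state." ++ fcS.1).toList = pvAC ++ fcS.1.toList := by
    simp [pvAC]
  have hnw : (((pvFieldMap.get? fcS.1).getD "") ++ "." ++ fcS.1).toList
      = fcS.2.toList ++ '.' :: fcS.1.toList := by
    rw [pv_comp_lookup fcS hfcmem]
    simp
  have hskip0 : ∀ j, j < p0.length →
      ¬ ('r' :: (pvATl ++ fcS.1.toList)) <+: (p0.drop j ++ pvBody n ps) :=
    fun j hj => pv_nopat _ _ (pv_noA_part p0 (pvBody n ps) hp0 (pvBody_shape n ps) j hj)
  obtain ⟨hpassR, hpassC⟩ := pv_pass n (fcS.1.toList, fcS.2.toList) hfc ps hmemA hbrs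
  have hcnt : PySem.Str.count s ("rocket_state." ++ fcS.1)
      = ps.countP (fun p => !(pvMatch n p).isSome && (fcS.1.toList).isPrefixOf p) := by
    rw [PySem.Str.count_eq, hold, hs, ← pvPat_eq, chars_count_eq, pvCnt_skip _ _ _ _ hskip0]
    exact hpassC
  have hcsucc := pvCountN_succ hfc ps
  unfold pvStep
  simp only [hcnt]
  by_cases hpos :
      (0 : Int) < ((ps.countP (fun p => !(pvMatch n p).isSome && (fcS.1.toList).isPrefixOf p) : Nat) : Int)
  · rw [if_pos hpos]
    constructor
    · rw [PySem.Str.toList_replace, hold, hnw, hs, ← pvPat_eq]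
      rw [chars_replace_eq, pvRepl_skip _ _ _ _ _ hskip0, hpassR]
    · simp only []
      rw [hcsucc]
      push_cast
      ring
  · rw [if_neg hpos]
    have hz : ps.countP (fun p => !(pvMatch n p).isSome && (fcS.1.toList).isPrefixOf p) = 0 := by
      omega
    constructor
    · rw [hs, pvBody_stable hfc hz]
    · rw [hcsucc, hz]
      push_cast
      ring

theorem pv_foldA {p0 : List Char} {ps : List (List Char)}
    (hp0 : ¬ pvAC <:+: p0)
    (hmemA : ∀ p ∈ ps, ¬ (pvAC <:+: p))
    (hbrs : ∀ pq ∈ ps.zip ps.tail, pvBridge pq.1 pq.2 = false) :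
    ∀ (m n : Nat), n + m = pvFieldsS.length → ∀ (s : String) (k : Int),
      s.toList = p0 ++ pvBody n ps → k = (pvCountN n ps : Int) →
      ((pvFieldsS.drop n).foldl pvStep (s, k)).1.toList = p0 ++ pvBody pvFieldsS.length ps
      ∧ ((pvFieldsS.drop n).foldl pvStep (s, k)).2 = (pvCountN pvFieldsS.length ps : Int) := by
  intro m
  induction m with
  | zero =>
      intro n hn s k hs hk
      have : n = pvFieldsS.length := by omega
      subst this
      rw [List.drop_length]
      exact ⟨by simpa using hs, by simpa using hk⟩
  | succ m ihm =>
      intro n hn s k hs hk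
      have hlt : n < pvFieldsS.length := by omega
      rw [List.drop_eq_getElem_cons hlt, List.foldl_cons]
      have hS : pvFieldsS[n]? = some pvFieldsS[n] := List.getElem?_eq_getElem hlt
      obtain ⟨h1, h2⟩ := pvStep_eval hS hp0 hmemA hbrs s k hs
      have := ihm (n + 1) (by omega) (pvStep (s, k) pvFieldsS[n]).1 (pvStep (s, k) pvFieldsS[n]).2
        h1 (by rw [h2, hk]; ring)
      simpa using this

theorem pv_join_nil (L : List (List Char)) : PySem.Chars.join [] L = L.flatten := by
  unfold PySem.Chars.join
  induction L with
  | nil => rfl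
  | cons h t ih =>
      cases t with
      | nil => simp [List.intercalate]
      | cons h2 t2 =>
          have hstep : List.intercalate ([] : List Char) (h :: h2 :: t2)
              = h ++ List.intercalate [] (h2 :: t2) := by
            simp [List.intercalate, List.intersperse]
          rw [hstep, ih]
          simp

-- B's per-fragment rendering
def pvRendS (part : String) : String :=
  match pvFieldsS.find? (fun fc => PySem.Str.startswith part fc.1) with
  | none => "rocket_state." ++ part
  | some fc => fc.2 ++ "." ++ part

theorem pv_match_full (part : String) :
    pvMatch pvFieldsC.length part.toList
      = (pvFieldsS.find? (fun fc => PySem.Str.startswith part fc.1)).map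
          (fun fc => (fc.1.toList, fc.2.toList)) := by
  unfold pvMatch
  rw [List.take_length, pvFieldsC, List.find?_map]
  congr 1

theorem pvRendS_toList (part : String) :
    (pvRendS part).toList = pvRend pvFieldsC.length part.toList := by
  unfold pvRendS
  cases hb : pvFieldsS.find? (fun fc => PySem.Str.startswith part fc.1) with
  | none =>
      rw [pvRend_anchor (by rw [pv_match_full, hb]; rfl)]
      simp [pvAC]
  | some fcS =>
      rw [pvRend_matched (gc := (fcS.1.toList, fcS.2.toList)) (by rw [pv_match_full, hb]; rfl)]
      simp

theorem pvRendS_isSome (part : String) :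
    ((pvFieldsS.find? (fun fc => PySem.Str.startswith part fc.1)).isSome)
      = (pvMatch pvFieldsC.length part.toList).isSome := by
  rw [pv_match_full]
  cases pvFieldsS.find? (fun fc => PySem.Str.startswith part fc.1) <;> rfl

-- B's loop body
def pvBStep (st : List String × Int) (part : String) : List String × Int :=
  match pvPairsB.find? (fun fc => PySem.Str.startswith part fc.1) with
  | none    => (st.1 ++ ["rocket_state." ++ part], st.2)
  | some fc => (st.1 ++ [fc.2 ++ "." ++ part], st.2 + 1)

theorem pv_foldB : ∀ (restS : List String) (acc : List String) (k : Int),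
    (restS.foldl pvBStep (acc, k)).1 = acc ++ restS.map pvRendS
    ∧ (restS.foldl pvBStep (acc, k)).2
        = k + ((restS.countP
            (fun part => (pvFieldsS.find? (fun fc => PySem.Str.startswith part fc.1)).isSome) : Nat) : Int) := by
  intro restS
  induction restS with
  | nil => intro acc k; simp
  | cons part rest ih =>
      intro acc k
      rw [List.foldl_cons]
      cases hf : pvFieldsS.find? (fun fc => PySem.Str.startswith part fc.1) with
      | none =>
          have hstep : pvBStep (acc, k) part = (acc ++ ["rocket_state." ++ part], k) := by
            unfold pvBStep; rw [pv_pairsB, hf]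
          rw [hstep]
          obtain ⟨h1, h2⟩ := ih (acc ++ ["rocket_state." ++ part]) k
          have hr : pvRendS part = "rocket_state." ++ part := by
            unfold pvRendS; rw [hf]
          constructor
          · rw [h1, List.map_cons, hr]
            simp
          · rw [h2, List.countP_cons]
            simp only [hf, Option.isSome_none]
            simp
      | some fc =>
          have hstep : pvBStep (acc, k) part
              = (acc ++ [fc.2 ++ "." ++ part], k + 1) := by
            unfold pvBStep; rw [pv_pairsB, hf]
          rw [hstep]
          obtain ⟨h1, h2⟩ := ih (acc ++ [fc.2 ++ "." ++ part]) (k + 1)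
          have hr : pvRendS part = fc.2 ++ "." ++ part := by
            unfold pvRendS; rw [hf]
          constructor
          · rw [h1, List.map_cons, hr]
            simp
          · rw [h2, List.countP_cons]
            simp only [hf, Option.isSome_some]
            push_cast
            ring

theorem pv_sw (part f : String) :
    PySem.Str.startswith part f = (f.toList).isPrefixOf part.toList := by
  rw [PySem.Str.startswith_eq]
  rfl

theorem pv_tail_map {α β : Type} (f : α → β) (l : List α) : (l.map f).tail = l.tail.map f := by
  cases l <;> simp

theorem pvHeadS_toList (j : Nat) (q : String) :
    (pvHeadS j q).toList = pvHead j q.toList := by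
  unfold pvHeadS pvHead pvMatch
  rw [pv_sorted, ← List.map_take, List.find?_map]
  unfold pvFieldsC
  rw [← List.map_take, List.find?_map]
  have hfun : ((fun f => PySem.Str.startswith q f) ∘ Prod.fst)
      = ((fun fc : List Char × List Char => fc.1.isPrefixOf q.toList)
          ∘ (fun p : String × String => (p.1.toList, p.2.toList))) := by
    funext fc
    simp only [Function.comp_apply]
    rw [pv_sw]
  rw [hfun]
  cases hb : (pvFieldsS.take j).find?
      ((fun fc : List Char × List Char => fc.1.isPrefixOf q.toList)
        ∘ (fun p : String × String => (p.1.toList, p.2.toList))) with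
  | none => rfl
  | some gS =>
      simp only [Option.map_some]
      exact congrArg String.toList
        (pv_comp_lookup gS ((pvFieldsS.take_subset j) (List.mem_of_find?_eq_some hb)))

theorem pvBridgeS_eq (p q : String) : pvBridgeS p q = pvBridge p.toList q.toList := by
  unfold pvBridgeS pvBridge
  rw [pv_sorted]
  unfold pvFieldsC
  rw [List.zipIdx_map, List.zipIdx_map, List.any_map, List.any_map]
  congr 1
  funext fj
  simp only [Function.comp_apply, Prod.map_fst, Prod.map_snd, id_eq]
  rw [pv_sw, pvHeadS_toList]
  rfl

set_option maxRecDepth 100000 in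
set_option maxHeartbeats 8000000 in
theorem pv_main (content filename : String) (hD : pvDcond content = false) :
    replace_rs_fields content filename = replace_rs_fields_alt content filename := by
  cases hP : pvSplitC 'r' pvATl content.toList with
  | nil => exact absurd hP (pvSplitC_ne_nil 'r' pvATl content.toList)
  | cons p0 ps =>
  have hSplitOn : PySem.Chars.splitOn content.toList pvAC = p0 :: ps := by
    rw [pvAC_cons, chars_splitOn_eq, hP]
  have hp0 : ¬ pvAC <:+: p0 := by
    rw [pvAC_cons]
    exact pvSplitC_no_infix 'r' pvATl content.toList p0 (by rw [hP]; exact List.mem_cons_self)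
  have hmemA : ∀ p ∈ ps, ¬ (pvAC <:+: p) := by
    intro p hp
    rw [pvAC_cons]
    exact pvSplitC_no_infix 'r' pvATl content.toList p (by rw [hP]; exact List.mem_cons_of_mem _ hp)
  -- the String-level split of the content
  have hsp : Option.map (List.map String.toList) (PySem.Str.split? content "rocket_state.")
      = some (p0 :: ps) := by
    rw [PySem.Str.split?_map]
    show PySem.Chars.split? content.toList pvAC = _
    rw [PySem.Chars.split?, if_neg (by decide), hSplitOn]
  cases hps? : PySem.Str.split? content "rocket_state." with
  | none => rw [hps?] at hsp; simp at hsp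
  | some partsS =>
  rw [hps?] at hsp
  simp only [Option.map_some, Option.some_inj] at hsp
  cases partsS with
  | nil => simp at hsp
  | cons q0 restS =>
  simp only [List.map_cons, List.cons.injEq] at hsp
  obtain ⟨hq0, hrest⟩ := hsp
  -- no bridge between consecutive fragments, from ¬D_
  have hbrs : ∀ pq ∈ ps.zip ps.tail, pvBridge pq.1 pq.2 = false := by
    have hd : pvDcond content = false := hD
    unfold pvDcond at hd
    rw [hps?] at hd
    simp only [Option.getD_some, List.tail_cons] at hd
    intro pq hpq
    have hzip : ps.zip ps.tail
        = (restS.zip restS.tail).map (Prod.map String.toList String.toList) := by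
      rw [← hrest, pv_tail_map, List.zip_map]
    rw [hzip] at hpq
    obtain ⟨pq', hpq', rfl⟩ := List.mem_map.mp hpq
    have := Bool.eq_false_iff.mpr (List.any_eq_false.mp hd pq' hpq')
    rw [pvBridgeS_eq] at this
    simpa using this
  -- starting point: the original text is the stage-0 rendering of its fragments
  have hjoin : content.toList = p0 ++ pvBody 0 ps := by
    have hj := pvSplitC_join 'r' pvATl content.toList
    rw [hP] at hj
    simp only [List.headI, List.tail_cons] at hj
    have hb0 : pvBody 0 ps = (ps.map (fun p => 'r' :: pvATl ++ p)).flatten := by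
      unfold pvBody
      congr 1
    rw [hb0]
    exact hj
  have hcnt0 : (0 : Int) = (pvCountN 0 ps : Int) := by
    have : pvCountN 0 ps = 0 := by
      refine List.countP_eq_zero.mpr ?_
      intro p _
      simp [pvMatch]
    rw [this]
    rfl
  obtain ⟨hA1, hA2⟩ := pv_foldA hp0 hmemA hbrs pvFieldsS.length 0 (by omega) content 0 hjoin hcnt0
  rw [List.drop_zero] at hA1 hA2
  rw [pv_A_fold content filename]
  obtain ⟨hB1, hB2⟩ := pv_foldB restS [q0] 0
  have hBval : replace_rs_fields_alt content filename
      = (PySem.Str.join "" ([q0] ++ restS.map pvRendS), 0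
          + ((restS.countP (fun part =>
              (pvFieldsS.find? (fun fc => PySem.Str.startswith part fc.1)).isSome) : Nat) : Int)) := by
    rw [replace_rs_fields_alt, hps?]
    show (PySem.Str.join "" (restS.foldl pvBStep ([q0], 0)).1, (restS.foldl pvBStep ([q0], 0)).2) = _
    rw [hB1, hB2]
  rw [hBval]
  -- both sides agree with the final rendering
  have hBlist : (PySem.Str.join "" ([q0] ++ restS.map pvRendS)).toList
      = p0 ++ pvBody pvFieldsS.length ps := by
    rw [PySem.Str.toList_join, show ("" : String).toList = [] from rfl, pv_join_nil]
    show ((([q0] ++ restS.map pvRendS).map String.toList)).flatten = _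
    rw [List.map_append, List.flatten_append]
    have hmaps : (restS.map pvRendS).map String.toList
        = ps.map (pvRend pvFieldsC.length) := by
      rw [List.map_map, show String.toList ∘ pvRendS = (pvRend pvFieldsC.length) ∘ String.toList
            from funext pvRendS_toList, ← List.map_map, hrest]
    rw [hmaps, pv_lenC]
    simp [hq0, pvBody]
  have hBcnt : restS.countP (fun part =>
        (pvFieldsS.find? (fun fc => PySem.Str.startswith part fc.1)).isSome)
      = pvCountN pvFieldsS.length ps := by
    unfold pvCountN
    rw [← hrest, List.countP_map]
    refine List.countP_congr ?_
    intro part _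
    rw [show ((pvFieldsS.find? (fun fc => PySem.Str.startswith part fc.1)).isSome)
          = ((pvMatch pvFieldsS.length part.toList).isSome) from by rw [pvRendS_isSome, pv_lenC]]
    exact Iff.rfl
  refine Prod.ext ?_ ?_
  · show (pvFieldsS.foldl pvStep (content, 0)).1 = _
    apply String.toList_inj.mp
    rw [hA1, hBlist]
  · show (pvFieldsS.foldl pvStep (content, 0)).2 = _
    rw [hA2, hBcnt]
    ring

-- ===== VERDICT (by name: the statement is the Claim_ definition above) =====
theorem replace_rs_fields_spec : Claim_equal_replace_rs_fields := by
  intro content filename _ hPre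
  exact pv_main content filename hPre
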